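-- pv_equiv track=rewrite | github.com/Gouderg/advent-of-code | 2021/day18/main.py | find_left_neighbour
-- ===== SOURCE A (Python) =====
-- def find_left_neighbour(str1):
--     a = []
--     for j in range(0, len(str1)):
--         if str1[j].isnumeric() and str1[j+1].isnumeric():
--             a.append((j, j+1, int(str1[j:j+2])))
--         elif str1[j].isnumeric() and not(str1[j-1].isnumeric()):
--             a.append((j, j, int(str1[j])))
--     if not a:
--         b, c, d = None, None, None
--     else:
--         b, c, d = a[-1][0], a[-1][1], a[-1][2]
--     return b, c, d
-- ===== SOURCE B (Python) =====
-- def find_left_neighbour(str1):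
--     # Scan from the right and return the first (i.e. rightmost) token directly,
--     # instead of collecting every token left-to-right and taking the last one.
--     for j in range(len(str1) - 1, -1, -1):
--         if str1[j].isnumeric():
--             if j + 1 < len(str1) and str1[j + 1].isnumeric():
--                 return (j, j + 1, int(str1[j:j + 2]))
--             if j == 0 or not str1[j - 1].isnumeric():
--                 return (j, j, int(str1[j]))
--     return (None, None, None)
-- ===== Notes on version B (the rewrite author's own statement) =====
-- stated objective: simpler
-- what changed: B scans the string from the right and returns the rightmost numeric token at the first match, instead of A's building of the complete token list left-to-right and taking its last element.
-- outside the precondition, e.g. on find_left_neighbour('x5'): A raises IndexError, B returns (1, 1, 5)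
-- crash fix: On strings whose last character is a digit A evaluates str1[j+1] at the last index and raises IndexError; B returns the rightmost token there (e.g. 'x5' -> (1, 1, 5)). — e.g. on find_left_neighbour("x5"): A raises IndexError, B returns (some 1, some 1, some 5)
import Mathlib
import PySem

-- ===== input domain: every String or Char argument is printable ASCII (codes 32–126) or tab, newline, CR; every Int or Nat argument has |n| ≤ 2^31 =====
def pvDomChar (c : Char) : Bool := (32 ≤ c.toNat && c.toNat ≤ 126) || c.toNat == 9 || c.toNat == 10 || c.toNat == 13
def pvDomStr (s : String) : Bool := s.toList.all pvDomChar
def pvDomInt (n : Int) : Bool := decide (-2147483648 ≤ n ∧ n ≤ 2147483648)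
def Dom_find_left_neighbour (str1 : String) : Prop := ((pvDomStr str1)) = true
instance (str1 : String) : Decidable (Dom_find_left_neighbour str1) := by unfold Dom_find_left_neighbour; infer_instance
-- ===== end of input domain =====

-- B scans the string from the right and returns the rightmost numeric token directly,
-- instead of A's building of the full token list left-to-right and taking its last element.
-- On the ASCII domain Dom_, Python's str.isnumeric on one character equals Chars.isdigit.

-- ===== PORT A =====
-- The pyGetD default ' ' is only reached where Python A raises IndexError
-- (str1[j+1] with a numeric last character) — exactly the inputs Pre_ excludes;
-- the (…).getD 0 on int() is never reached on the taken branches (both chars are digits).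
def find_left_neighbour (str1 : String) : Option Int × Option Int × Option Int :=
  let cs := str1.toList
  let a : List (Int × Int × Int) :=
    (PySem.List.pyRange 0 (cs.length : Int) 1).foldl (fun a j =>
      if PySem.Chars.isdigit (PySem.List.pyGetD cs j ' ') &&
         PySem.Chars.isdigit (PySem.List.pyGetD cs (j + 1) ' ') then
        a ++ [(j, j + 1, (PySem.Int.ofChars? (PySem.List.slice cs (some j) (some (j + 2)))).getD 0)]
      else if PySem.Chars.isdigit (PySem.List.pyGetD cs j ' ') &&
              !PySem.Chars.isdigit (PySem.List.pyGetD cs (j - 1) ' ') then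
        a ++ [(j, j, (PySem.Int.ofChars? [PySem.List.pyGetD cs j ' ']).getD 0)]
      else a) []
  match a.getLast? with
  | none => (none, none, none)
  | some (b, c, d) => (some b, some c, some d)

-- ===== PORT B =====
-- `fln_go cs k` examines indices k-1, k-2, …, 0 (Source B's `for j in range(len-1, -1, -1)`),
-- returning at the first (rightmost) numeric token.
def fln_go (cs : List Char) : Nat → Option Int × Option Int × Option Int
  | 0 => (none, none, none)
  | j + 1 =>
    if PySem.Chars.isdigit (cs.getD j ' ') then
      if j + 1 < cs.length && PySem.Chars.isdigit (cs.getD (j + 1) ' ') then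
        (some (j : Int), some ((j : Int) + 1),
          some ((PySem.Int.ofChars? (PySem.List.slice cs (some (j : Int)) (some ((j : Int) + 2)))).getD 0))
      else if j == 0 || !PySem.Chars.isdigit (cs.getD (j - 1) ' ') then
        (some (j : Int), some (j : Int), some ((PySem.Int.ofChars? [cs.getD j ' ']).getD 0))
      else fln_go cs j
    else fln_go cs j

def find_left_neighbour_alt (str1 : String) : Option Int × Option Int × Option Int :=
  fln_go str1.toList str1.toList.length

-- ===== PRECONDITION & SPEC =====
-- Pre_ excludes exactly the strings whose last character is a digit: there Python A
-- evaluates str1[j+1] at j = len-1 and raises IndexError (see Raises_ below).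
def Pre_find_left_neighbour (str1 : String) : Prop :=
  str1.toList.getLast?.all (fun c => !PySem.Chars.isdigit c) = true
instance (str1 : String) : Decidable (Pre_find_left_neighbour str1) := by
  unfold Pre_find_left_neighbour; infer_instance
def pvWitness_find_left_neighbour : String := "ab12c."

-- On strings ending in a digit A raises IndexError; B returns the rightmost token.
def Raises_find_left_neighbour (str1 : String) : Prop :=
  str1.toList.getLast?.any (fun c => PySem.Chars.isdigit c) = true
instance (str1 : String) : Decidable (Raises_find_left_neighbour str1) := by
  unfold Raises_find_left_neighbour; infer_instance
def pvRaiseWitness_find_left_neighbour : String := "x5"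
def pvRaiseWitnessOut_find_left_neighbour : Option Int × Option Int × Option Int :=
  (some 1, some 1, some 5)

def Spec_find_left_neighbour (str1 : String) (out : Option Int × Option Int × Option Int) : Prop := out = find_left_neighbour_alt str1
instance (str1 : String) (out : Option Int × Option Int × Option Int) : Decidable (Spec_find_left_neighbour str1 out) := by unfold Spec_find_left_neighbour; infer_instance

-- ===== CLAIM (what is proved, stated in full; the proofs are below) =====
def Claim_equal_find_left_neighbour : Prop := ∀ (str1 : String), Dom_find_left_neighbour str1 → Pre_find_left_neighbour str1 → Spec_find_left_neighbour str1 (find_left_neighbour str1)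
def Claim_raises_find_left_neighbour : Prop := (∀ (str1 : String), Dom_find_left_neighbour str1 → Raises_find_left_neighbour str1 → ¬ Pre_find_left_neighbour str1) ∧ (Dom_find_left_neighbour (pvRaiseWitness_find_left_neighbour) ∧ Raises_find_left_neighbour (pvRaiseWitness_find_left_neighbour) ∧ find_left_neighbour_alt (pvRaiseWitness_find_left_neighbour) = pvRaiseWitnessOut_find_left_neighbour)

-- ===== LEMMAS AND PROOFS =====

-- the token emitted at index j (A's loop body as a list to append)
def flnEntry (cs : List Char) (j : Int) : List (Int × Int × Int) :=
  if PySem.Chars.isdigit (PySem.List.pyGetD cs j ' ') &&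
     PySem.Chars.isdigit (PySem.List.pyGetD cs (j + 1) ' ') then
    [(j, j + 1, (PySem.Int.ofChars? (PySem.List.slice cs (some j) (some (j + 2)))).getD 0)]
  else if PySem.Chars.isdigit (PySem.List.pyGetD cs j ' ') &&
          !PySem.Chars.isdigit (PySem.List.pyGetD cs (j - 1) ' ') then
    [(j, j, (PySem.Int.ofChars? [PySem.List.pyGetD cs j ' ']).getD 0)]
  else []

theorem foldl_entry (cs : List Char) (l : List Int) (init : List (Int × Int × Int)) :
    l.foldl (fun a j =>
      if PySem.Chars.isdigit (PySem.List.pyGetD cs j ' ') &&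
         PySem.Chars.isdigit (PySem.List.pyGetD cs (j + 1) ' ') then
        a ++ [(j, j + 1, (PySem.Int.ofChars? (PySem.List.slice cs (some j) (some (j + 2)))).getD 0)]
      else if PySem.Chars.isdigit (PySem.List.pyGetD cs j ' ') &&
              !PySem.Chars.isdigit (PySem.List.pyGetD cs (j - 1) ' ') then
        a ++ [(j, j, (PySem.Int.ofChars? [PySem.List.pyGetD cs j ' ']).getD 0)]
      else a) init
    = init ++ l.flatMap (flnEntry cs) := by
  induction l generalizing init with
  | nil => simp
  | cons x xs ih =>
    simp only [List.foldl_cons, List.flatMap_cons, ih, flnEntry]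
    split_ifs <;> simp

-- convert Python's tuple-of-ints to the Option triple A returns
def flnConv (o : Option (Int × Int × Int)) : Option Int × Option Int × Option Int :=
  match o with
  | none => (none, none, none)
  | some (b, c, d) => (some b, some c, some d)

theorem fln_go_eq (cs : List Char)
    (hlast : cs.getLast?.all (fun c => !PySem.Chars.isdigit c) = true)
    (k : Nat) (hk : k ≤ cs.length) :
    fln_go cs k = flnConv ((((List.range k).map (fun (j : Nat) => (j : Int))).flatMap (flnEntry cs)).getLast?) := by
  induction k with
  | zero => simp [fln_go, flnConv]
  | succ k ih =>
    rw [List.range_succ, List.map_append, List.flatMap_append, List.getLast?_append]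
    simp only [List.map_cons, List.map_nil, List.flatMap_cons, List.flatMap_nil, List.append_nil]
    have hk' : k ≤ cs.length := Nat.le_of_succ_le hk
    have hklt : k < cs.length := hk
    have hget : PySem.List.pyGetD cs (k : Int) ' ' = cs.getD k ' ' :=
      PySem.List.pyGetD_natCast cs k ' '
    by_cases hd : PySem.Chars.isdigit (cs.getD k ' ') = true
    · -- current char is a digit
      have hne : cs ≠ [] := by
        intro h; subst h; simp at hklt
      -- the last char is not a digit, hence k is not the last index on the digit branches
      have hlastne : PySem.Chars.isdigit (cs.getLast hne) = false := by
        rw [List.getLast?_eq_some_getLast hne] at hlast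
        simpa using hlast
      have hk1 : k + 1 < cs.length := by
        rcases Nat.lt_or_ge (k + 1) cs.length with h | h
        · exact h
        · exfalso
          have : cs.getD k ' ' = cs.getLast hne := by
            rw [List.getD_eq_getElem cs ' ' hklt, List.getLast_eq_getElem]
            congr 1
            omega
          rw [this, hlastne] at hd; exact Bool.noConfusion hd
      have hget1 : PySem.List.pyGetD cs ((k : Int) + 1) ' ' = cs.getD (k + 1) ' ' := by
        have h : ((k : Int) + 1) = ((k + 1 : Nat) : Int) := by push_cast; ring
        rw [h, PySem.List.pyGetD_natCast]
      by_cases hd1 : PySem.Chars.isdigit (cs.getD (k + 1) ' ') = true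
      · -- two-digit token at k
        have hflat : flnEntry cs (k : Int)
            = [((k : Int), (k : Int) + 1,
                (PySem.Int.ofChars? (PySem.List.slice cs (some (k : Int)) (some ((k : Int) + 2)))).getD 0)] := by
          unfold flnEntry
          rw [hget, hget1, hd, hd1]
          simp
        rw [hflat]
        have hc1 : (decide (k + 1 < cs.length) && PySem.Chars.isdigit (cs.getD (k + 1) ' ')) = true := by
          rw [decide_eq_true hk1, Bool.true_and]; exact hd1
        simp only [fln_go]
        rw [if_pos hd, if_pos hc1]
        simp [flnConv]
      · -- maybe a one-digit token at k
        have hd1f : PySem.Chars.isdigit (cs.getD (k + 1) ' ') = false := by simpa using hd1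
        have hc1 : (decide (k + 1 < cs.length) && PySem.Chars.isdigit (cs.getD (k + 1) ' ')) = false := by
          rw [hd1f, Bool.and_false]
        have hprev : PySem.List.pyGetD cs ((k : Int) - 1) ' '
            = if k = 0 then cs.getLast hne else cs.getD (k - 1) ' ' := by
          by_cases h0 : k = 0
          · subst h0
            rw [if_pos rfl]
            simpa using PySem.List.pyGetD_neg_one cs ' ' hne
          · rw [if_neg h0]
            have h : ((k : Int) - 1) = ((k - 1 : Nat) : Int) := by omega
            rw [h, PySem.List.pyGetD_natCast]
        by_cases h2 : (k == 0 || !PySem.Chars.isdigit (cs.getD (k - 1) ' ')) = true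
        · -- one-digit token fires
          have hprev' : PySem.Chars.isdigit (PySem.List.pyGetD cs ((k : Int) - 1) ' ') = false := by
            rw [hprev]
            by_cases h0 : k = 0
            · rw [if_pos h0]; exact hlastne
            · rw [if_neg h0]
              rcases Bool.or_eq_true_iff.mp h2 with h | h
              · exact absurd (by simpa using h) h0
              · simpa using h
          have hflat : flnEntry cs (k : Int)
              = [((k : Int), (k : Int), (PySem.Int.ofChars? [PySem.List.pyGetD cs (k : Int) ' ']).getD 0)] := by
            unfold flnEntry
            rw [hget, hget1, hd, hd1f, hprev']
            simp
          rw [hflat]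
          simp only [fln_go]
          rw [if_pos hd, if_neg (by rw [hc1]; exact Bool.false_ne_true), if_pos h2]
          simp [flnConv, hget]
        · -- no token at k (interior of a digit run)
          have h0 : ¬ k = 0 := by
            intro h; subst h; simp at h2
          have hprevd : PySem.Chars.isdigit (cs.getD (k - 1) ' ') = true := by
            by_contra hcon
            have hf : PySem.Chars.isdigit (cs.getD (k - 1) ' ') = false := by simpa using hcon
            exact h2 (by rw [hf]; simp)
          have hflat : flnEntry cs (k : Int) = [] := by
            unfold flnEntry
            rw [hget, hget1, hd, hd1f, hprev, if_neg h0, hprevd]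
            simp
          rw [hflat]
          have h2f : (k == 0 || !PySem.Chars.isdigit (cs.getD (k - 1) ' ')) = false := by
            simpa using h2
          simp only [fln_go]
          rw [if_pos hd, if_neg (by rw [hc1]; exact Bool.false_ne_true),
            if_neg (by rw [h2f]; exact Bool.false_ne_true)]
          simp only [List.getLast?_nil, Option.none_or]
          exact ih hk'
    · -- current char is not a digit: no token
      have hdf : PySem.Chars.isdigit (cs.getD k ' ') = false := by simpa using hd
      have hflat : flnEntry cs (k : Int) = [] := by
        unfold flnEntry
        rw [hget]
        have c1 : (PySem.Chars.isdigit (cs.getD k ' ') &&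
            PySem.Chars.isdigit (PySem.List.pyGetD cs ((k : Int) + 1) ' ')) = false := by
          rw [hdf, Bool.false_and]
        have c2 : (PySem.Chars.isdigit (cs.getD k ' ') &&
            !PySem.Chars.isdigit (PySem.List.pyGetD cs ((k : Int) - 1) ' ')) = false := by
          rw [hdf, Bool.false_and]
        rw [if_neg (by rw [c1]; exact Bool.false_ne_true), if_neg (by rw [c2]; exact Bool.false_ne_true)]
      rw [hflat]
      simp only [fln_go]
      rw [if_neg (by rw [hdf]; exact Bool.false_ne_true)]
      simp only [List.getLast?_nil, Option.none_or]
      exact ih hk'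

-- ===== VERDICT (by name: the statement is the Claim_ definition above) =====
theorem find_left_neighbour_spec : Claim_equal_find_left_neighbour := by
  intro str1 _hdom hpre
  unfold Spec_find_left_neighbour find_left_neighbour find_left_neighbour_alt
  simp only
  rw [foldl_entry, PySem.List.pyRange_zero_natCast]
  rw [fln_go_eq str1.toList hpre str1.toList.length (le_refl _)]
  simp only [List.nil_append, flnConv]

@[simp] theorem find_left_neighbour_raises : Claim_raises_find_left_neighbour := by
  unfold Claim_raises_find_left_neighbour
  constructor
  · intro str1 _hdom hr hp
    unfold Raises_find_left_neighbour at hr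
    unfold Pre_find_left_neighbour at hp
    cases h : str1.toList.getLast? with
    | none => rw [h] at hr; simp at hr
    | some c =>
      rw [h] at hr hp
      simp at hr hp
      rw [hr] at hp
      exact Bool.noConfusion hp
  · exact ⟨by decide, by decide, by decide⟩
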